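-- pv_equiv track=rewrite | github.com/Wutpeach/transcribe-skill | skills/transcribe/scripts/drafting.py | _max_prefix_index_within_limit
-- ===== SOURCE A (Python) =====
-- def _max_prefix_index_within_limit(text: str, max_line_chars: int) -> int:
--     units = 0
--     last_valid = 0
--     for index, char in enumerate(text, start=1):
--         if char.isspace():
--             last_valid = index
--             continue
--         units += 1
--         if units > max_line_chars:
--             return max(last_valid, 1)
--         last_valid = index
--     return max(last_valid, 1)
-- ===== SOURCE B (Python) =====
-- def _max_prefix_index_within_limit(text: str, max_line_chars: int) -> int:
--     positions = [i for i, c in enumerate(text) if not c.isspace()]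
--     if not positions or len(positions) <= max_line_chars:
--         return max(len(text), 1)
--     return max(positions[max(max_line_chars, 0)], 1)
-- ===== Notes on version B (the rewrite author's own statement) =====
-- stated objective: simpler
-- what changed: A's rolling (units, last_valid) state machine with an early return is replaced by building the list of non-space character positions once and answering by a length test and a single clamped index lookup.
import Mathlib
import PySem

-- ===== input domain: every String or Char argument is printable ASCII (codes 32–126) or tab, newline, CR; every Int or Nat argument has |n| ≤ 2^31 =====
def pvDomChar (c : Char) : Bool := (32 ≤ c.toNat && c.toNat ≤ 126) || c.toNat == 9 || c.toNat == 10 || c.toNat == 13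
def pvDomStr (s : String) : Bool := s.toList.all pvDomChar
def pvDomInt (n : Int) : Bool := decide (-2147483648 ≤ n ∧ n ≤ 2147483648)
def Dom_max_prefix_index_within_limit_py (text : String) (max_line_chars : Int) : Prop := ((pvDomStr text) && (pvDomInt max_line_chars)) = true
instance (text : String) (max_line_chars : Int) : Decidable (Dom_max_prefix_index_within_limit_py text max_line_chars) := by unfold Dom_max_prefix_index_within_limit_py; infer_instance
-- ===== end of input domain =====

-- B replaces A's rolling (units, last_valid) tracker and early return by one table of
-- non-space positions, selected from by index arithmetic (objective: simpler; same O(n) cost).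

-- ===== PORT A =====
-- the for-loop of A: state (units, last_valid), early return when units > max_line_chars
def pvA_loop (mlc : Int) : List (Int × Char) → Int → Int → Int
  | [], _units, last_valid => max last_valid 1
  | (index, char) :: rest, units, last_valid =>
    if PySem.Chars.isspace char then
      pvA_loop mlc rest units index
    else
      if units + 1 > mlc then max last_valid 1
      else pvA_loop mlc rest (units + 1) index

def max_prefix_index_within_limit_py (text : String) (max_line_chars : Int) : Int :=
  pvA_loop max_line_chars (PySem.List.enumerate text.toList 1) 0 0

-- ===== PORT B =====
def max_prefix_index_within_limit_py_alt (text : String) (max_line_chars : Int) : Int :=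
  let positions := ((PySem.List.enumerate text.toList 0).filter
      (fun p => !PySem.Chars.isspace p.2)).map (·.1)
  if positions = [] ∨ (positions.length : Int) ≤ max_line_chars then
    max (PySem.Str.len text) 1
  else
    -- positions[max(max_line_chars, 0)]: the index is in range whenever this branch is
    -- reached, so the .getD 0 default is never used
    max ((PySem.List.pyGet? positions (max max_line_chars 0)).getD 0) 1

-- ===== PRECONDITION & SPEC =====
def Spec_max_prefix_index_within_limit_py (text : String) (max_line_chars : Int) (out : Int) : Prop := out = max_prefix_index_within_limit_py_alt text max_line_chars
instance (text : String) (max_line_chars : Int) (out : Int) : Decidable (Spec_max_prefix_index_within_limit_py text max_line_chars out) := by unfold Spec_max_prefix_index_within_limit_py; infer_instance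

-- ===== CLAIM (what is proved, stated in full; the proofs are below) =====
def Claim_equal_max_prefix_index_within_limit_py : Prop := ∀ (text : String) (max_line_chars : Int), Dom_max_prefix_index_within_limit_py text max_line_chars → Spec_max_prefix_index_within_limit_py text max_line_chars (max_prefix_index_within_limit_py text max_line_chars)

-- ===== LEMMAS AND PROOFS =====

-- positions of the non-space characters of cs, 0-based from offset i
def pvPos (cs : List Char) (i : Int) : List Int :=
  ((PySem.List.enumerate cs i).filter (fun p => !PySem.Chars.isspace p.2)).map (·.1)

lemma pvPos_nil (i : Int) : pvPos [] i = [] := by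
  simp [pvPos, PySem.List.enumerate_nil]

lemma pvPos_cons (c : Char) (cs : List Char) (i : Int) :
    pvPos (c :: cs) i =
      if PySem.Chars.isspace c then pvPos cs (i + 1) else i :: pvPos cs (i + 1) := by
  cases hs : PySem.Chars.isspace c <;>
    simp [pvPos, PySem.List.enumerate_cons, hs]

lemma pvGet_cons_pos (x : Int) (xs : List Int) (k : Int) (hk : 1 ≤ k) :
    PySem.List.pyGet? (x :: xs) k = PySem.List.pyGet? xs (k - 1) := by
  obtain ⟨m, rfl⟩ : ∃ m : Nat, k = ((m + 1 : Nat) : Int) := ⟨(k - 1).toNat, by omega⟩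
  rw [PySem.List.pyGet?_natCast,
    show ((m + 1 : Nat) : Int) - 1 = ((m : Nat) : Int) by push_cast; omega,
    PySem.List.pyGet?_natCast]
  simp

-- the invariant of A's loop: last_valid equals the offset of the untouched suffix
lemma pvA_loop_eq (cs : List Char) (mlc : Int) (i u : Int) :
    pvA_loop mlc (PySem.List.enumerate cs (i + 1)) u i =
      if pvPos cs i = [] ∨ ((pvPos cs i).length : Int) ≤ mlc - u then
        max (i + cs.length) 1
      else
        max ((PySem.List.pyGet? (pvPos cs i) (max (mlc - u) 0)).getD 0) 1 := by
  induction cs generalizing i u with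
  | nil => simp [PySem.List.enumerate_nil, pvA_loop, pvPos_nil]
  | cons c cs ih =>
    rw [PySem.List.enumerate_cons, pvPos_cons]
    cases hs : PySem.Chars.isspace c
    case true =>
      simp only [pvA_loop, hs, if_true]
      have := ih (i + 1) u
      rw [show i + 1 + 1 = (i + 1) + 1 by ring] at this
      rw [this]
      have hlen : ((i : Int) + 1) + (cs.length : Int) = i + ((c :: cs).length : Int) := by
        simp; ring
      split_ifs with h <;> simp only [hlen]
    case false =>
      simp only [pvA_loop, hs, Bool.false_eq_true, if_false]
      by_cases hgt : u + 1 > mlc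
      · -- early return: the (mlc+1-u)-th non-space char is c itself
        rw [if_pos hgt]
        have hmax : max (mlc - u) 0 = 0 := by omega
        have hcond : ¬ ((i :: pvPos cs (i + 1)) = [] ∨
            (((i :: pvPos cs (i + 1)).length : Int)) ≤ mlc - u) := by
          push Not
          refine ⟨by simp, ?_⟩
          have : (0 : Int) ≤ ((pvPos cs (i + 1)).length : Int) := by positivity
          simp only [List.length_cons]
          push_cast
          omega
        rw [if_neg hcond, hmax]
        simp [PySem.List.pyGet?, PySem.List.pyIdx?]
      · rw [if_neg hgt]
        have := ih (i + 1) (u + 1)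
        rw [show i + 1 + 1 = (i + 1) + 1 by ring] at this
        rw [this]
        have hk : (1 : Int) ≤ mlc - u := by omega
        have hlen : ((i : Int) + 1) + (cs.length : Int) = i + ((c :: cs).length : Int) := by
          simp; ring
        by_cases hc : ((pvPos cs (i + 1)).length : Int) ≤ mlc - (u + 1)
        · rw [if_pos (Or.inr hc),
            if_pos (Or.inr (by simp only [List.length_cons]; push_cast; omega))]
          simp only [hlen]
        · have hne : pvPos cs (i + 1) ≠ [] := by
            intro h0
            rw [h0] at hc
            simp at hc
            omega
          rw [if_neg (by tauto),
            if_neg (by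
              push Not
              refine ⟨by simp, ?_⟩
              simp only [List.length_cons]
              push_cast
              omega)]
          have hmax1 : max (mlc - u) 0 = mlc - u := by omega
          have hmax2 : max (mlc - (u + 1)) 0 = mlc - u - 1 := by omega
          rw [hmax1, hmax2, pvGet_cons_pos _ _ _ hk,
            show mlc - u - 1 = mlc - (u + 1) by ring]

theorem max_prefix_index_within_limit_py_spec : Claim_equal_max_prefix_index_within_limit_py := by
  intro text mlc _
  unfold Spec_max_prefix_index_within_limit_py
  unfold max_prefix_index_within_limit_py max_prefix_index_within_limit_py_alt
  have h := pvA_loop_eq text.toList mlc 0 0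
  rw [show (0 : Int) + 1 = 1 by ring] at h
  rw [h]
  simp only [pvPos, Int.sub_zero, Int.zero_add, PySem.Str.len_eq]
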